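-- pv_equiv track=rewrite | github.com/ursakumeljfaks/Prakticna-matematika | 1.letnik/programiranje1/vaje/15/slovarji/lego_kocke.py | slovar_kock
-- ===== SOURCE A (Python) =====
-- def slovar_kock(skatla):
--     """sestavi slovar vsebovanih kock, urejen po tipih ter po barvah"""
--     urejeno = {}
--     for kocka in skatla:
--         tip_kocke = kocka.split(".")[0]
--         barva_kocke = kocka.split(".")[1]
--         if tip_kocke not in urejeno:
--             urejeno[tip_kocke] = {}
--         urejeno[tip_kocke][barva_kocke] = urejeno[tip_kocke].get(barva_kocke, 0) + 1
--     return urejeno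
-- ===== SOURCE B (Python) =====
-- def slovar_kock(skatla):
--     """sestavi slovar vsebovanih kock, urejen po tipih ter po barvah"""
--     pari = [(kocka.split(".")[0], kocka.split(".")[1]) for kocka in skatla]
--     tipi = list(dict.fromkeys(t for t, _ in pari))
--     return {t: {b: sum(1 for p in pari if p == (t, b))
--                 for b in dict.fromkeys(b2 for t2, b2 in pari if t2 == t)}
--             for t in tipi}
-- ===== Notes on version B (the rewrite author's own statement) =====
-- stated objective: alternative
-- what changed: A builds the nested dict incrementally in one pass with in-place increments; B first parses all pairs, computes the key orders with dict.fromkeys dedup, and builds the whole nested dict in one declarative comprehension with per-key counting.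
import Mathlib
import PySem

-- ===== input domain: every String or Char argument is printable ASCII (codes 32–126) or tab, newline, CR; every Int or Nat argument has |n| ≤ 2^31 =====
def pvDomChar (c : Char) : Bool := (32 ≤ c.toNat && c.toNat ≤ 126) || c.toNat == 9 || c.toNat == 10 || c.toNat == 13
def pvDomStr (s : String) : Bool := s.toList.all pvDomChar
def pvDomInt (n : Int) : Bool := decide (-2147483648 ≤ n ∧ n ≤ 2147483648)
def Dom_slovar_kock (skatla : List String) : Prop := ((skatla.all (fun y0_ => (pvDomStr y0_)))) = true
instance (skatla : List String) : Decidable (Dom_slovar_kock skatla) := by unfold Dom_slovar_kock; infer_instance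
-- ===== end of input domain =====

-- B replaces A's incremental one-pass nested-dict build by a declarative build: parse all (type, colour)
-- pairs first, dedup to get the key orders, then construct the whole nested dict by counting per key
-- (alternative decomposition, not faster).

-- ===== PORT A =====
-- kocka.split(".")[0] / [1]; .getD "" totalizes the IndexError case, which Pre_ excludes
def pvTip (kocka : String) : String :=
  (PySem.List.pyGet? ((PySem.Str.split? kocka ".").getD []) 0).getD ""

def pvBarva (kocka : String) : String :=
  (PySem.List.pyGet? ((PySem.Str.split? kocka ".").getD []) 1).getD ""

def pvStepA (urejeno : PySem.Dict String (PySem.Dict String Int)) (kocka : String) :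
    PySem.Dict String (PySem.Dict String Int) :=
  let tip := pvTip kocka
  let barva := pvBarva kocka
  let u := if urejeno.contains tip then urejeno else urejeno.insert tip PySem.Dict.empty
  u.insert tip ((u.getD tip PySem.Dict.empty).insert barva
    ((u.getD tip PySem.Dict.empty).getD barva 0 + 1))

def slovar_kock (skatla : List String) : List (String × List (String × Int)) :=
  (skatla.foldl pvStepA PySem.Dict.empty).items.map (fun p => (p.1, p.2.items))

-- ===== PORT B =====
def slovar_kock_alt (skatla : List String) : List (String × List (String × Int)) :=
  let pari := skatla.map (fun kocka => (pvTip kocka, pvBarva kocka))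
  let tipi := PySem.List.dedup (pari.map Prod.fst)
  tipi.map (fun t => (t,
    (PySem.List.dedup ((pari.filter (fun p => p.1 == t)).map Prod.snd)).map
      (fun b => (b, (pari.count (t, b) : Int)))))

-- ===== PRECONDITION & SPEC =====
-- Pre_ excludes exactly the inputs where Python A raises IndexError: an element with no '.'
-- (kocka.split(".")[1] does not exist there); B raises identically.
def Pre_slovar_kock (skatla : List String) : Prop :=
  (skatla.all (fun s => s.toList.contains '.')) = true

instance (skatla : List String) : Decidable (Pre_slovar_kock skatla) := by
  unfold Pre_slovar_kock; infer_instance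

def pvWitness_slovar_kock : List String := ["opeka.rdeca", "opeka.modra", "plosca.rdeca"]

def Spec_slovar_kock (skatla : List String) (out : List (String × List (String × Int))) : Prop :=
  out = slovar_kock_alt skatla

instance (skatla : List String) (out : List (String × List (String × Int))) :
    Decidable (Spec_slovar_kock skatla out) := by unfold Spec_slovar_kock; infer_instance

-- ===== CLAIM (what is proved, stated in full; the proofs are below) =====
def Claim_equal_slovar_kock : Prop :=
  ∀ (skatla : List String), Dom_slovar_kock skatla → Pre_slovar_kock skatla →
    Spec_slovar_kock skatla (slovar_kock skatla)

-- ===== LEMMAS AND PROOFS =====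

def pvInner (ks : List (String × String)) (t : String) : List (String × Int) :=
  (PySem.List.dedup ((ks.filter (fun p => p.1 == t)).map Prod.snd)).map
    (fun b => (b, (ks.count (t, b) : Int)))

def pvG (ks : List (String × String)) : List (String × PySem.Dict String Int) :=
  (PySem.List.dedup (ks.map Prod.fst)).map (fun t => (t, PySem.Dict.mk (pvInner ks t)))

theorem pv_dedup_append {α : Type} [BEq α] [LawfulBEq α] (l : List α) (x : α) :
    PySem.List.dedup (l ++ [x]) =
      if x ∈ l then PySem.List.dedup l else PySem.List.dedup l ++ [x] := by
  simp [PySem.List.dedup_eq_ofList, PySem.Set.ofList_append_singleton, PySem.Set.add,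
    PySem.Set.contains, PySem.Set.mem_ofList]

theorem pv_getD_mk_map {ν : Type} (m : List String) (g : String → ν)
    (t : String) (hm : m.Nodup) (ht : t ∈ m) (d0 : ν) :
    (PySem.Dict.mk (m.map (fun t' => (t', g t')))).getD t d0 = g t := by
  apply PySem.Dict.getD_of_mem_items
  · exact List.mem_map.mpr ⟨t, ht, rfl⟩
  · simpa [PySem.Dict.keys_mk, List.map_map, Function.comp_def] using hm

theorem pv_getD_mk_map_not {ν : Type} (m : List String) (g : String → ν)
    (t : String) (ht : t ∉ m) (d0 : ν) :
    (PySem.Dict.mk (m.map (fun t' => (t', g t')))).getD t d0 = d0 := by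
  apply PySem.Dict.getD_of_not_contains
  simp [PySem.Dict.contains_mk]
  intro a ha
  exact fun h => ht (by simpa [h] using ha)

theorem pv_contains_mk_map {ν : Type} (m : List String) (g : String → ν) (t : String) :
    (PySem.Dict.mk (m.map (fun t' => (t', g t')))).contains t = decide (t ∈ m) := by
  by_cases h : t ∈ m <;> simp [PySem.Dict.contains_mk, List.any_map, Function.comp_def, h]
  exact fun x hx hxt => h (hxt ▸ hx)

theorem pv_count_append_ne (ks : List (String × String)) (t b t' b' : String)
    (h : (t', b') ≠ (t, b)) : (ks ++ [(t, b)]).count (t', b') = ks.count (t', b') := by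
  simp [List.count_append, List.count_cons]
  exact fun ht hb => h (by simp [ht.symm, hb.symm])

theorem pvInner_append_ne (ks : List (String × String)) (t b t' : String) (h : t' ≠ t) :
    pvInner (ks ++ [(t, b)]) t' = pvInner ks t' := by
  simp only [pvInner, List.filter_append]
  have h1 : List.filter (fun p => p.1 == t') [(t, b)] = [] := by
    simp [Ne.symm h]
  rw [h1, List.append_nil]
  apply List.map_congr_left
  intro b' _
  have : (ks ++ [(t, b)]).count (t', b') = ks.count (t', b') := by
    apply pv_count_append_ne
    exact fun hp => h (congrArg Prod.fst hp)
  rw [this]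

def pvStepK (u : PySem.Dict String (PySem.Dict String Int)) (k : String × String) :
    PySem.Dict String (PySem.Dict String Int) :=
  let u' := if u.contains k.1 then u else u.insert k.1 PySem.Dict.empty
  u'.insert k.1 ((u'.getD k.1 PySem.Dict.empty).insert k.2
    ((u'.getD k.1 PySem.Dict.empty).getD k.2 0 + 1))

theorem pv_filter_append_self (ks : List (String × String)) (t b : String) :
    List.filter (fun p => p.1 == t) (ks ++ [(t, b)])
      = List.filter (fun p => p.1 == t) ks ++ [(t, b)] := by
  simp [List.filter_append]

theorem pv_inner_insert (ks : List (String × String)) (t b : String) :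
    (PySem.Dict.mk (pvInner ks t)).insert b ((PySem.Dict.mk (pvInner ks t)).getD b 0 + 1)
      = PySem.Dict.mk (pvInner (ks ++ [(t, b)]) t) := by
  have hsnd : List.map Prod.snd [(t, b)] = [b] := rfl
  by_cases hB : b ∈ (List.filter (fun p => p.1 == t) ks).map Prod.snd
  · have hBm : b ∈ PySem.List.dedup ((List.filter (fun p => p.1 == t) ks).map Prod.snd) :=
      (PySem.List.mem_dedup _ _).mpr hB
    have hget : (PySem.Dict.mk (pvInner ks t)).getD b 0 = (ks.count (t, b) : Int) := by
      simp only [pvInner]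
      exact pv_getD_mk_map _ (fun b' => (ks.count (t, b') : Int)) b
        (PySem.List.nodup_dedup _) hBm 0
    have hcontb : (PySem.Dict.mk (pvInner ks t)).contains b = true := by
      simp only [pvInner]; rw [pv_contains_mk_map]; exact decide_eq_true hBm
    apply PySem.Dict.ext
    rw [hget, PySem.Dict.items_insert_of_contains _ _ hcontb]
    show List.map _ (pvInner ks t) = pvInner (ks ++ [(t, b)]) t
    simp only [pvInner, pv_filter_append_self, List.map_append, hsnd]
    rw [pv_dedup_append, if_pos hB, List.map_map]
    apply List.map_congr_left
    intro b' hb'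
    by_cases hbe : b' = b
    · subst hbe
      simp [List.count_append]
    · have hne : (t, b') ≠ (t, b) := fun hp => hbe (congrArg Prod.snd hp)
      simp [hbe, pv_count_append_ne ks t b t b' hne]
  · have hBm : b ∉ PySem.List.dedup ((List.filter (fun p => p.1 == t) ks).map Prod.snd) :=
      fun h => hB ((PySem.List.mem_dedup _ _).mp h)
    have hget : (PySem.Dict.mk (pvInner ks t)).getD b 0 = 0 := by
      simp only [pvInner]
      exact pv_getD_mk_map_not _ (fun b' => (ks.count (t, b') : Int)) b hBm 0
    have hcontb : (PySem.Dict.mk (pvInner ks t)).contains b = false := by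
      simp only [pvInner]; rw [pv_contains_mk_map]; exact decide_eq_false hBm
    have hcnt0 : ks.count (t, b) = 0 := by
      rw [List.count_eq_zero]
      intro hmem
      exact hB (List.mem_map.mpr ⟨(t, b), List.mem_filter.mpr ⟨hmem, by simp⟩, rfl⟩)
    apply PySem.Dict.ext
    rw [hget, PySem.Dict.items_insert_of_not_contains _ _ hcontb]
    show pvInner ks t ++ [(b, 0 + 1)] = pvInner (ks ++ [(t, b)]) t
    simp only [pvInner, pv_filter_append_self, List.map_append, hsnd]
    rw [pv_dedup_append, if_neg hB, List.map_append]
    congr 1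
    · apply List.map_congr_left
      intro b' hb'
      have hbe : b' ≠ b := fun h => hBm (h ▸ hb')
      have hne : (t, b') ≠ (t, b) := fun hp => hbe (congrArg Prod.snd hp)
      rw [pv_count_append_ne ks t b t b' hne]
    · simp [List.count_append, List.count_cons, hcnt0]

theorem pv_step (ks : List (String × String)) (t b : String) :
    pvStepK (PySem.Dict.mk (pvG ks)) (t, b) = PySem.Dict.mk (pvG (ks ++ [(t, b)])) := by
  have hfst : List.map Prod.fst [(t, b)] = [t] := rfl
  by_cases hT : t ∈ ks.map Prod.fst
  · have hTm : t ∈ PySem.List.dedup (ks.map Prod.fst) := (PySem.List.mem_dedup _ _).mpr hT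
    have hcont : (PySem.Dict.mk (pvG ks)).contains t = true := by
      simp only [pvG]; rw [pv_contains_mk_map]; exact decide_eq_true hTm
    have hget : (PySem.Dict.mk (pvG ks)).getD t PySem.Dict.empty
        = PySem.Dict.mk (pvInner ks t) := by
      simp only [pvG]
      exact pv_getD_mk_map _ (fun t' => PySem.Dict.mk (pvInner ks t')) t
        (PySem.List.nodup_dedup _) hTm _
    simp only [pvStepK, hcont, if_true, hget, pv_inner_insert]
    apply PySem.Dict.ext
    rw [PySem.Dict.items_insert_of_contains _ _ hcont]
    show List.map _ (pvG ks) = pvG (ks ++ [(t, b)])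
    simp only [pvG, List.map_append, hfst]
    rw [pv_dedup_append, if_pos hT, List.map_map]
    apply List.map_congr_left
    intro t' ht'
    by_cases hte : t' = t
    · subst hte
      simp
    · have h1 : ((t', PySem.Dict.mk (pvInner ks t')).1 == t) = false := by
        simp [hte]
      simp only [Function.comp_def, h1, Bool.false_eq_true, if_false,
        pvInner_append_ne ks t b t' hte]
  · have hTm : t ∉ PySem.List.dedup (ks.map Prod.fst) :=
      fun h => hT ((PySem.List.mem_dedup _ _).mp h)
    have hcont : (PySem.Dict.mk (pvG ks)).contains t = false := by
      simp only [pvG]; rw [pv_contains_mk_map]; exact decide_eq_false hTm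
    have hcnt0 : ks.count (t, b) = 0 := by
      rw [List.count_eq_zero]
      intro hmem
      exact hT (List.mem_map.mpr ⟨(t, b), hmem, rfl⟩)
    have hfil : List.filter (fun p => p.1 == t) ks = [] := by
      rw [List.filter_eq_nil_iff]
      intro p hp
      simp only [beq_iff_eq]
      exact fun h => hT (List.mem_map.mpr ⟨p, hp, h⟩)
    have hinner1 : pvInner (ks ++ [(t, b)]) t = [(b, 1)] := by
      simp only [pvInner, pv_filter_append_self, hfil, List.nil_append]
      show (PySem.List.dedup [b]).map _ = _
      have : PySem.List.dedup [b] = [b] := rfl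
      rw [this]
      simp [List.count_append, List.count_cons, hcnt0]
    simp only [pvStepK, hcont, Bool.false_eq_true, if_false]
    rw [PySem.Dict.getD_insert_self, PySem.Dict.insert_insert_self, PySem.Dict.getD_empty]
    have hemp : (PySem.Dict.empty : PySem.Dict String Int).insert b (0 + 1)
        = PySem.Dict.mk [(b, 1)] := by
      apply PySem.Dict.ext
      rw [PySem.Dict.items_insert_of_not_contains _ _ (PySem.Dict.contains_empty b)]
      norm_num
      rfl
    rw [hemp]
    apply PySem.Dict.ext
    rw [PySem.Dict.items_insert_of_not_contains _ _ hcont]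
    show pvG ks ++ [(t, PySem.Dict.mk [(b, 1)])] = pvG (ks ++ [(t, b)])
    simp only [pvG, List.map_append, hfst]
    rw [pv_dedup_append, if_neg hT, List.map_append]
    congr 1
    · apply List.map_congr_left
      intro t' ht'
      have hte : t' ≠ t := fun h => hTm (h ▸ ht')
      rw [pvInner_append_ne ks t b t' hte]
    · simp [hinner1]


theorem pvStepA_eq (u : PySem.Dict String (PySem.Dict String Int)) (kocka : String) :
    pvStepA u kocka = pvStepK u (pvTip kocka, pvBarva kocka) := rfl

theorem pv_main (ks : List (String × String)) :
    ks.foldl pvStepK PySem.Dict.empty = PySem.Dict.mk (pvG ks) := by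
  induction ks using List.reverseRecOn with
  | nil => rfl
  | append_singleton l k ih =>
      rcases k with ⟨t, b⟩
      rw [List.foldl_append, List.foldl_cons, List.foldl_nil, ih, pv_step]

-- ===== VERDICT (by name: the statement is the Claim_ definition above) =====
theorem slovar_kock_spec : Claim_equal_slovar_kock := by
  intro skatla _ _
  unfold Spec_slovar_kock slovar_kock slovar_kock_alt
  have h : skatla.foldl pvStepA PySem.Dict.empty
      = (skatla.map (fun kocka => (pvTip kocka, pvBarva kocka))).foldl pvStepK PySem.Dict.empty := by
    rw [List.foldl_map]
    exact congrFun (congrFun (congrArg List.foldl (funext fun u => funext fun k => pvStepA_eq u k)) PySem.Dict.empty) skatla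
  rw [h, pv_main]
  simp [pvG, pvInner, List.map_map, Function.comp]
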